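-- pv_equiv track=rewrite | github.com/AITheorem/individual | src/tr/result_files/graph_funcs.py | max_nested_dicts
-- ===== SOURCE A (Python) =====
-- def collect_nested_data(nested_dict):
--     data_collection_dict = {}
--     for key, dicts_list in nested_dict.items():
--         value_lists = {}
--         for d in dicts_list:
--             for inner_key, value in d.items():
--                 if inner_key in value_lists:
--                     value_lists[inner_key].append(value)
--                 else:
--                     value_lists[inner_key] = [value]
--         data_collection_dict[key] = value_lists
--     return data_collection_dict
--
-- def max_nested_dicts(nested_dict):
--     data_collection_dict = collect_nested_data(nested_dict)
--     max_dict = {}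
--     for key, value_lists in data_collection_dict.items():
--         max_dict[key] = {
--             inner_key: max(values) for inner_key, values in value_lists.items()
--         }
--     return max_dict
-- ===== SOURCE B (Python) =====
-- def _best_of(pairs):
--     best = {}
--     for k, v in pairs:
--         if k not in best or best[k] < v:
--             best[k] = v
--     return best
--
--
-- def max_nested_dicts(nested_dict):
--     return {
--         key: _best_of(p for d in dicts_list for p in d.items())
--         for key, dicts_list in nested_dict.items()
--     }
-- ===== Notes on version B (the rewrite author's own statement) =====
-- stated objective: simpler
-- what changed: B drops the collect_nested_data helper and its intermediate per-key value lists entirely: it flattens each key's list of dicts into one item stream and maintains a running per-inner-key maximum in a single pass, instead of A's two phases of collecting every value into lists and then reducing each list with max().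
import Mathlib
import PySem

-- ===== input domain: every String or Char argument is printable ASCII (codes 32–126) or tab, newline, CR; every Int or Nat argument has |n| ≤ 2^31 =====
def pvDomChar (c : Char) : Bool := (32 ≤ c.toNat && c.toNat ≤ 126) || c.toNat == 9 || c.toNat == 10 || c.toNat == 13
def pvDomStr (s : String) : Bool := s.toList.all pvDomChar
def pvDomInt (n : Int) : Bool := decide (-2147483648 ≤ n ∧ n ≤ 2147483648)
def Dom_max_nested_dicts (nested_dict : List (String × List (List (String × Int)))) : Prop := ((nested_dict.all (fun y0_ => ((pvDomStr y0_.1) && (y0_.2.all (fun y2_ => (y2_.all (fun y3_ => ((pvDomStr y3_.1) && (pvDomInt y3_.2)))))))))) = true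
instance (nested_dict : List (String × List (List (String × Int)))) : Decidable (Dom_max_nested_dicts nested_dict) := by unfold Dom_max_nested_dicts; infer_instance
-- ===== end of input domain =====

-- B replaces A's two-phase collect-all-values-then-reduce with a single running per-key maximum
-- over the flattened item stream (objective: simpler — no intermediate value lists).

-- ===== PORT A =====
-- Python max(values) on a nonempty list of ints; every list A maxes over is created as [v],
-- so the `.getD 0` default of the unreachable empty case is never used.
def pvPyMax (vs : List Int) : Int := (PySem.List.max? vs (fun y => y)).getD 0

-- helper collect_nested_data, inner two loops (per top-level key)
def pvCollect (dicts_list : List (List (String × Int))) : PySem.Dict String (List Int) :=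
  dicts_list.foldl
    (fun value_lists d =>
      d.foldl
        (fun value_lists p =>
          match value_lists.get? p.1 with
          | some vs => value_lists.insert p.1 (vs ++ [p.2])
          | none    => value_lists.insert p.1 [p.2])
        value_lists)
    PySem.Dict.empty

def max_nested_dicts (nested_dict : List (String × List (List (String × Int)))) : List (String × List (String × Int)) :=
  let data_collection_dict : PySem.Dict String (PySem.Dict String (List Int)) :=
    nested_dict.foldl (fun acc kv => acc.insert kv.1 (pvCollect kv.2)) PySem.Dict.empty
  let max_dict : PySem.Dict String (PySem.Dict String Int) :=
    data_collection_dict.items.foldl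
      (fun md kv =>
        md.insert kv.1
          (kv.2.items.foldl (fun inner q => inner.insert q.1 (pvPyMax q.2)) PySem.Dict.empty))
      PySem.Dict.empty
  max_dict.items.map (fun p => (p.1, p.2.items))

-- ===== PORT B =====
-- 'if k not in best or best[k] < v: best[k] = v' (the lookup is guarded by the short-circuit 'or')
def pvBestOf (pairs : List (String × Int)) : PySem.Dict String Int :=
  pairs.foldl
    (fun best p =>
      match best.get? p.1 with
      | none   => best.insert p.1 p.2
      | some m => if m < p.2 then best.insert p.1 p.2 else best)
    PySem.Dict.empty

def max_nested_dicts_alt (nested_dict : List (String × List (List (String × Int)))) : List (String × List (String × Int)) :=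
  (nested_dict.foldl
      (fun res kv => res.insert kv.1 (pvBestOf (kv.2.flatMap (fun d => d))))
      PySem.Dict.empty).items.map
    (fun p => (p.1, p.2.items))

-- ===== PRECONDITION & SPEC =====
def Spec_max_nested_dicts (nested_dict : List (String × List (List (String × Int)))) (out : List (String × List (String × Int))) : Prop := out = max_nested_dicts_alt nested_dict
instance (nested_dict : List (String × List (List (String × Int)))) (out : List (String × List (String × Int))) : Decidable (Spec_max_nested_dicts nested_dict out) := by unfold Spec_max_nested_dicts; infer_instance

-- ===== CLAIM (what is proved, stated in full; the proofs are below) =====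
def Claim_equal_max_nested_dicts : Prop := ∀ (nested_dict : List (String × List (List (String × Int)))), Dom_max_nested_dicts nested_dict → Spec_max_nested_dicts nested_dict (max_nested_dicts nested_dict)

-- ===== LEMMAS AND PROOFS =====

-- map a function over the values of a dict, keeping keys and order
def pvMapVal {ν ν' : Type} (h : ν → ν') (d : PySem.Dict String ν) : PySem.Dict String ν' :=
  PySem.Dict.mk (d.items.map (fun p => (p.1, h p.2)))

theorem pvMapVal_keys {ν ν' : Type} (h : ν → ν') (d : PySem.Dict String ν) :
    (pvMapVal h d).keys = d.keys := by
  obtain ⟨l⟩ := d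
  simp [pvMapVal, PySem.Dict.keys_mk]

theorem pvMapVal_contains {ν ν' : Type} (h : ν → ν') (d : PySem.Dict String ν) (k : String) :
    (pvMapVal h d).contains k = d.contains k := by
  rw [PySem.Dict.contains_eq_decide_mem_keys, PySem.Dict.contains_eq_decide_mem_keys,
    pvMapVal_keys]

theorem pvMapVal_get? {ν ν' : Type} (h : ν → ν') (d : PySem.Dict String ν) (k : String) :
    (pvMapVal h d).get? k = (d.get? k).map h := by
  obtain ⟨l⟩ := d
  induction l with
  | nil => rfl
  | cons p t ih =>
    simp only [pvMapVal, List.map_cons] at *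
    rw [PySem.Dict.get?_mk_cons, PySem.Dict.get?_mk_cons]
    by_cases hk : (p.1 == k) = true <;> simp [hk, ih]

theorem pvMapVal_insert {ν ν' : Type} (h : ν → ν') (d : PySem.Dict String ν) (k : String) (v : ν) :
    pvMapVal h (d.insert k v) = (pvMapVal h d).insert k (h v) := by
  apply PySem.Dict.ext
  by_cases hc : d.contains k = true
  · have hc' : (pvMapVal h d).contains k = true := by rw [pvMapVal_contains]; exact hc
    rw [PySem.Dict.items_insert_of_contains _ _ hc']
    simp only [pvMapVal, PySem.Dict.items_insert_of_contains _ _ hc, List.map_map]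
    apply List.map_congr_left
    intro p _
    by_cases hp : p.1 = k <;> simp [hp]
  · have hc' : (pvMapVal h d).contains k = false := by
      rw [pvMapVal_contains]; exact Bool.eq_false_iff.mpr hc
    rw [PySem.Dict.items_insert_of_not_contains _ _ hc']
    simp [pvMapVal, PySem.Dict.items_insert_of_not_contains _ _ (Bool.eq_false_iff.mpr hc)]

-- overwriting a key absent from a list is the identity
theorem pv_map_id_of_no_key {ν : Type} (l : List (String × ν)) (k : String) (v : ν)
    (h : ∀ q ∈ l, q.1 ≠ k) :
    l.map (fun p => if (p.1 == k) = true then (k, v) else p) = l := by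
  induction l with
  | nil => rfl
  | cons p t ih =>
    rw [List.map_cons, if_neg (by simp [h p List.mem_cons_self]),
      ih (fun q hq => h q (List.mem_cons_of_mem p hq))]

-- with Nodup keys, an element of items with key k is THE element get? finds
theorem pv_map_overwrite_id {ν : Type} (l : List (String × ν)) (k : String) (v : ν)
    (hnd : (l.map (·.1)).Nodup) (hmem : (k, v) ∈ l) :
    l.map (fun p => if (p.1 == k) = true then (k, v) else p) = l := by
  induction l with
  | nil => simp
  | cons p t ih =>
    simp only [List.map_cons, List.nodup_cons, List.mem_map] at hnd
    rcases List.mem_cons.mp hmem with hp | ht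
    · subst hp
      simp only [List.map_cons, beq_self_eq_true, if_pos, List.cons.injEq, true_and]
      exact pv_map_id_of_no_key t _ _ (fun q hq hk => hnd.1 ⟨q, hq, hk⟩)
    · have hp1 : p.1 ≠ k := by
        intro h
        exact hnd.1 ⟨(k, v), ht, by simp [h]⟩
      rw [List.map_cons, if_neg (by simp [hp1]), ih hnd.2 ht]

theorem pv_insert_same {ν : Type} (d : PySem.Dict String ν) (k : String) (v : ν)
    (hnd : d.keys.Nodup) (hget : d.get? k = some v) : d.insert k v = d := by
  have hc : d.contains k = true := by
    rw [PySem.Dict.contains_eq_isSome_get?, hget]; rfl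
  apply PySem.Dict.ext
  rw [PySem.Dict.items_insert_of_contains _ _ hc]
  have hnd' : (d.items.map (·.1)).Nodup := hnd
  exact pv_map_overwrite_id _ _ _ hnd' (PySem.Dict.mem_items_of_get?_eq_some d hget)

theorem pvPyMax_singleton (v : Int) : pvPyMax [v] = v := by
  simp [pvPyMax, PySem.List.max?_id_cons]

theorem pvPyMax_append (vs : List Int) (v : Int) (h : vs ≠ []) :
    pvPyMax (vs ++ [v]) = max (pvPyMax vs) v := by
  obtain ⟨x, t, rfl⟩ := List.exists_cons_of_ne_nil h
  simp [pvPyMax, PySem.List.max?_id_cons, List.foldl_append]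

-- the loop invariant tying A's list-collecting accumulator to B's running-max accumulator
def pvInv (c : PySem.Dict String (List Int)) (b : PySem.Dict String Int) : Prop :=
  c.keys.Nodup ∧ (∀ p ∈ c.items, p.2 ≠ ([] : List Int)) ∧ b = pvMapVal pvPyMax c

theorem pvInv_step (c : PySem.Dict String (List Int)) (b : PySem.Dict String Int)
    (p : String × Int) (h : pvInv c b) :
    pvInv
      (match c.get? p.1 with
        | some vs => c.insert p.1 (vs ++ [p.2])
        | none    => c.insert p.1 [p.2])
      (match b.get? p.1 with
        | none   => b.insert p.1 p.2
        | some m => if m < p.2 then b.insert p.1 p.2 else b) := by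
  obtain ⟨hnd, hne, rfl⟩ := h
  cases hget : c.get? p.1 with
  | none =>
    have hb : (pvMapVal pvPyMax c).get? p.1 = none := by rw [pvMapVal_get?, hget]; rfl
    refine ⟨PySem.Dict.nodup_keys_insert _ _ _ hnd, ?_, ?_⟩
    · intro q hq
      rcases (PySem.Dict.mem_items_insert _ _ _ _).mp hq with rfl | ⟨hq', _⟩
      · simp
      · exact hne _ hq'
    · rw [hb, pvMapVal_insert, pvPyMax_singleton]
  | some vs =>
    have hvs : vs ≠ [] := hne _ (PySem.Dict.mem_items_of_get?_eq_some c hget)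
    have hb : (pvMapVal pvPyMax c).get? p.1 = some (pvPyMax vs) := by
      rw [pvMapVal_get?, hget]; rfl
    refine ⟨PySem.Dict.nodup_keys_insert _ _ _ hnd, ?_, ?_⟩
    · intro q hq
      rcases (PySem.Dict.mem_items_insert _ _ _ _).mp hq with rfl | ⟨hq', _⟩
      · simp
      · exact hne _ hq'
    · rw [hb, pvMapVal_insert, pvPyMax_append vs p.2 hvs]
      show (if pvPyMax vs < p.2 then (pvMapVal pvPyMax c).insert p.1 p.2
          else pvMapVal pvPyMax c) =
        (pvMapVal pvPyMax c).insert p.1 (max (pvPyMax vs) p.2)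
      by_cases hlt : pvPyMax vs < p.2
      · rw [if_pos hlt, max_eq_right (le_of_lt hlt)]
      · rw [if_neg hlt, max_eq_left (le_of_not_gt hlt)]
        exact (pv_insert_same _ _ _ (by rw [pvMapVal_keys]; exact hnd) hb).symm

theorem pvInv_foldl (ps : List (String × Int)) (c : PySem.Dict String (List Int))
    (b : PySem.Dict String Int) (h : pvInv c b) :
    pvInv
      (ps.foldl
        (fun c p =>
          match c.get? p.1 with
          | some vs => c.insert p.1 (vs ++ [p.2])
          | none    => c.insert p.1 [p.2]) c)
      (ps.foldl
        (fun b p =>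
          match b.get? p.1 with
          | none   => b.insert p.1 p.2
          | some m => if m < p.2 then b.insert p.1 p.2 else b) b) := by
  induction ps generalizing c b with
  | nil => exact h
  | cons p t ih => exact ih _ _ (pvInv_step c b p h)

theorem pvInv_empty : pvInv PySem.Dict.empty PySem.Dict.empty := by
  refine ⟨PySem.Dict.nodup_keys_empty, ?_, rfl⟩
  intro p hp
  exact absurd hp List.not_mem_nil

-- A's nested collect loop is the pair loop over the flattened stream
theorem pvCollect_eq_foldl_flat (dl : List (List (String × Int))) :
    pvCollect dl =
      (dl.flatMap (fun d => d)).foldl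
        (fun c p =>
          match c.get? p.1 with
          | some vs => c.insert p.1 (vs ++ [p.2])
          | none    => c.insert p.1 [p.2]) PySem.Dict.empty := by
  unfold pvCollect
  generalize (PySem.Dict.empty : PySem.Dict String (List Int)) = c
  induction dl generalizing c with
  | nil => rfl
  | cons d t ih => simp only [List.flatMap_cons, List.foldl_append, List.foldl_cons]; exact ih _

theorem pvInv_collect (dl : List (List (String × Int))) :
    pvInv (pvCollect dl) (pvBestOf (dl.flatMap (fun d => d))) := by
  rw [pvCollect_eq_foldl_flat]
  exact pvInv_foldl _ _ _ pvInv_empty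

-- rebuilding a Nodup-keyed dict entry by entry while mapping the values is pvMapVal
theorem pv_rebuild_eq_mapVal (c : PySem.Dict String (List Int)) (hnd : c.keys.Nodup) :
    c.items.foldl (fun inner q => inner.insert q.1 (pvPyMax q.2)) PySem.Dict.empty =
      pvMapVal pvPyMax c := by
  apply PySem.Dict.ext
  rw [PySem.Dict.items_foldl_insert_fresh c.items (·.1) (fun q => pvPyMax q.2)
    PySem.Dict.empty (fun a _ => PySem.Dict.contains_empty _) hnd]
  rfl

-- pushing a value map through a dict-building fold
theorem pv_mapVal_build {β ν ν' : Type} (h : ν → ν') (f : String × β → ν)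
    (l : List (String × β)) (d : PySem.Dict String ν) :
    l.foldl (fun a kv => a.insert kv.1 (h (f kv))) (pvMapVal h d) =
      pvMapVal h (l.foldl (fun a kv => a.insert kv.1 (f kv)) d) := by
  induction l generalizing d with
  | nil => rfl
  | cons kv t ih =>
    simp only [List.foldl_cons]
    rw [← pvMapVal_insert, ih]

-- every value stored by a dict-building fold satisfies P
theorem pv_values_pred {β ν : Type} (P : ν → Prop) (f : String × β → ν)
    (l : List (String × β)) (d : PySem.Dict String ν)
    (hd : ∀ q ∈ d.items, P q.2) (hf : ∀ kv, P (f kv)) :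
    ∀ q ∈ (l.foldl (fun a kv => a.insert kv.1 (f kv)) d).items, P q.2 := by
  induction l generalizing d with
  | nil => exact hd
  | cons kv t ih =>
    simp only [List.foldl_cons]
    refine ih _ ?_
    intro q hq
    rcases (PySem.Dict.mem_items_insert _ _ _ _).mp hq with rfl | ⟨hq', _⟩
    · exact hf kv
    · exact hd _ hq'

-- ===== VERDICT (by name: the statement is the Claim_ definition above) =====
theorem max_nested_dicts_spec : Claim_equal_max_nested_dicts := by
  intro nested_dict _
  unfold Spec_max_nested_dicts max_nested_dicts max_nested_dicts_alt
  simp only []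
  set data : PySem.Dict String (PySem.Dict String (List Int)) :=
    nested_dict.foldl (fun acc kv => acc.insert kv.1 (pvCollect kv.2)) PySem.Dict.empty with hdata
  have hnd : data.keys.Nodup := by
    rw [hdata]
    exact PySem.Dict.nodup_keys_foldl_insert_key nested_dict (·.1) (fun _ kv => pvCollect kv.2)
      PySem.Dict.empty PySem.Dict.nodup_keys_empty
  have hv : ∀ q ∈ data.items, (PySem.Dict.keys q.2).Nodup := by
    rw [hdata]
    exact pv_values_pred (fun c => c.keys.Nodup) (fun kv => pvCollect kv.2) nested_dict
      PySem.Dict.empty (by intro q hq; exact absurd hq List.not_mem_nil)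
      (by intro kv; exact (pvInv_collect kv.2).1)
  have hB : nested_dict.foldl
      (fun res kv => res.insert kv.1 (pvBestOf (kv.2.flatMap (fun d => d))))
      PySem.Dict.empty = pvMapVal (pvMapVal pvPyMax) data := by
    have hfun : (fun (res : PySem.Dict String (PySem.Dict String Int))
          (kv : String × List (List (String × Int))) =>
        res.insert kv.1 (pvBestOf (kv.2.flatMap (fun d => d)))) =
        (fun res kv => res.insert kv.1 (pvMapVal pvPyMax (pvCollect kv.2))) := by
      funext res kv
      rw [(pvInv_collect kv.2).2.2]
    rw [hfun, hdata]
    exact pv_mapVal_build (pvMapVal pvPyMax) (fun kv => pvCollect kv.2) nested_dict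
      PySem.Dict.empty
  rw [PySem.Dict.items_foldl_insert_fresh data.items (·.1)
    (fun kv => kv.2.items.foldl (fun inner q => inner.insert q.1 (pvPyMax q.2)) PySem.Dict.empty)
    PySem.Dict.empty (fun a _ => PySem.Dict.contains_empty _) hnd, hB]
  simp only [pvMapVal, List.map_map,
    show (PySem.Dict.empty : PySem.Dict String (PySem.Dict String Int)).items = [] from rfl,
    List.nil_append]
  apply List.map_congr_left
  intro kv hkv
  simp only [Function.comp_apply]
  rw [pv_rebuild_eq_mapVal kv.2 (hv kv hkv)]
  rfl
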